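-- pv_equiv track=rewrite | github.com/prusinskiPiotr/algorithms | chapter_2/anagram_detection.py | anagramSolution1
-- ===== SOURCE A (Python) =====
-- def anagramSolution1(s1, s2):
--     if len(s1) != len(s2):
--         stillOk = False
--
--     alist = list(s2)
--
--     pos1 = 0
--     stillOk = True
--
--     while pos1 < len(s1) and stillOk:
--         pos2 = 0
--         found = False
--         while pos2 < len(alist) and not found:
--             if s1[pos1] == alist[pos2]:
--                 found = True
--             else:
--                 pos2 = pos2 + 1
--
--         if found:
--             alist[pos2] = None
--         else:
--             stillOk = False
--
--         pos1 = pos1 + 1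
--
--     return stillOk
-- ===== SOURCE B (Python) =====
-- def anagramSolution1(s1, s2):
--     # One-pass counting: tally s2's characters, then consume them for each char of s1.
--     counts = {}
--     for c in s2:
--         counts[c] = counts.get(c, 0) + 1
--     for c in s1:
--         n = counts.get(c, 0)
--         if n == 0:
--             return False
--         counts[c] = n - 1
--     return True
-- ===== Notes on version B (the rewrite author's own statement) =====
-- stated objective: faster
-- what changed: Replaces A's per-character linear scan of a mutable copy of s2 with a single counting pass: build a character-count dict of s2, then decrement it for each char of s1.
import Mathlib
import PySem

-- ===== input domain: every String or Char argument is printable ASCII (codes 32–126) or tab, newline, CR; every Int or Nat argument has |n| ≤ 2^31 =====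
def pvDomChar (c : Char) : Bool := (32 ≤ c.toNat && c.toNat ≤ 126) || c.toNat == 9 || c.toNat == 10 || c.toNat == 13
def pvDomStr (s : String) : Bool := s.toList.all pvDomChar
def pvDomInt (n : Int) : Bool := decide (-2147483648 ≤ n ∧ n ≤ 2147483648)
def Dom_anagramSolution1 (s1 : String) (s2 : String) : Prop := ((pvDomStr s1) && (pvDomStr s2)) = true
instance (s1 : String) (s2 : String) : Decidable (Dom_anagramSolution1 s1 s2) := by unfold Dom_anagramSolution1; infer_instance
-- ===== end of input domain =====

-- B replaces A's quadratic scan-and-blank search over a copy of s2 with a single counting pass (faster).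

-- ===== PORT A =====
-- inner while loop: scan alist from pos2 = 0 for the first slot equal to s1[pos1]
-- (blanked slots hold `none`, matching Python's `alist[pos2] = None`; Char == None is False)
def pvFindA (c : Char) : List (Option Char) → Option Nat
  | [] => none
  | x :: xs => if x == some c then some 0 else (pvFindA c xs).map (· + 1)

-- outer while loop over s1 (the loop exits as soon as stillOk becomes False)
def pvLoopA : List Char → List (Option Char) → Bool
  | [], _ => true
  | c :: rest, alist =>
    match pvFindA c alist with
    | some i => pvLoopA rest (alist.set i none)   -- found: alist[pos2] = None, continue
    | none => false                               -- not found: stillOk = False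

def anagramSolution1 (s1 : String) (s2 : String) : Bool :=
  -- the initial `if len(s1) != len(s2): stillOk = False` is dead code: stillOk is reassigned to True below it
  pvLoopA s1.toList (s2.toList.map some)

-- ===== PORT B =====
-- second loop of Source B: consume one count per character of s1
def pvLoopB : List Char → PySem.Dict Char Int → Bool
  | [], _ => true
  | c :: rest, d =>
    let n := d.getD c 0
    if n == 0 then false else pvLoopB rest (d.insert c (n - 1))

def anagramSolution1_alt (s1 : String) (s2 : String) : Bool :=
  pvLoopB s1.toList
    (s2.toList.foldl (fun d c => d.insert c (d.getD c 0 + 1)) PySem.Dict.empty)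

-- ===== PRECONDITION & SPEC =====
def Spec_anagramSolution1 (s1 : String) (s2 : String) (out : Bool) : Prop := out = anagramSolution1_alt s1 s2
instance (s1 : String) (s2 : String) (out : Bool) : Decidable (Spec_anagramSolution1 s1 s2 out) := by unfold Spec_anagramSolution1; infer_instance

-- ===== CLAIM (what is proved, stated in full; the proofs are below) =====
def Claim_equal_anagramSolution1 : Prop := ∀ (s1 : String) (s2 : String), Dom_anagramSolution1 s1 s2 → Spec_anagramSolution1 s1 s2 (anagramSolution1 s1 s2)

-- ===== LEMMAS AND PROOFS =====

-- the inner scan fails exactly when no slot still holds `some c`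
lemma pvFindA_eq_none_iff (c : Char) (l : List (Option Char)) :
    pvFindA c l = none ↔ (some c) ∉ l := by
  induction l with
  | nil => simp [pvFindA]
  | cons x xs ih =>
    by_cases h : x = some c
    · simp [pvFindA, h]
    · simp [pvFindA, h, Ne.symm h, ih]

-- blanking the slot the inner scan found removes exactly one occurrence of `some c`
lemma pvFindA_set_count (c c' : Char) (l : List (Option Char)) (i : Nat)
    (h : pvFindA c l = some i) :
    ((l.set i none).count (some c') : Int)
      = (l.count (some c') : Int) - (if c' = c then 1 else 0) := by
  induction l generalizing i with
  | nil => simp [pvFindA] at h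
  | cons x xs ih =>
    by_cases hx : x = some c
    · simp [pvFindA, hx] at h
      subst h
      subst hx
      by_cases hc : c' = c <;>
        simp [List.count_cons, hc]
      · exact fun e => hc e.symm
    · simp [pvFindA, hx] at h
      obtain ⟨j, hj, rfl⟩ := h
      have := ih j hj
      by_cases hxc : x = some c' <;>
        simp [hxc, this]; omega

-- the two loops agree whenever the dict holds the exact multiplicities of the remaining slots
lemma loop_eq (cs : List Char) :
    ∀ (alist : List (Option Char)) (d : PySem.Dict Char Int),
      (∀ c, d.getD c 0 = (alist.count (some c) : Int)) →
      pvLoopA cs alist = pvLoopB cs d := by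
  induction cs with
  | nil => intro _ _ _; rfl
  | cons c rest ih =>
    intro alist d hinv
    cases hfind : pvFindA c alist with
    | none =>
      have hnot : (some c) ∉ alist := (pvFindA_eq_none_iff c alist).mp hfind
      have hz : d.getD c 0 = 0 := by
        rw [hinv c, List.count_eq_zero_of_not_mem hnot]; rfl
      simp [pvLoopA, pvLoopB, hfind, hz]
    | some i =>
      have hcount := pvFindA_set_count c c alist i hfind
      have hpos : (1 : Int) ≤ (alist.count (some c) : Int) := by
        have h0 : (0 : Int) ≤ ((alist.set i none).count (some c) : Int) := by positivity
        rw [if_pos rfl] at hcount; omega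
      have hne : (d.getD c 0 == 0) = false := by
        rw [hinv c]; simp; omega
      have hrec := ih (alist.set i none) (d.insert c (d.getD c 0 - 1)) (by
        intro c'
        rw [PySem.Dict.getD_insert, pvFindA_set_count c c' alist i hfind, hinv c']
        by_cases hc : c' = c <;> simp [hc, hinv c])
      simp only [pvLoopA, pvLoopB, hfind, hne]
      exact hrec

theorem anagramSolution1_eq (s1 s2 : String) :
    anagramSolution1 s1 s2 = anagramSolution1_alt s1 s2 := by
  unfold anagramSolution1 anagramSolution1_alt
  apply loop_eq
  intro c
  rw [PySem.Dict.getD_foldl_insert_add_one, PySem.Dict.getD_empty,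
      List.count_map_of_injective _ _ (fun a b => Option.some.inj) c]
  simp

-- ===== VERDICT (by name: the statement is the Claim_ definition above) =====
theorem anagramSolution1_spec : Claim_equal_anagramSolution1 := by
  intro s1 s2 _
  exact anagramSolution1_eq s1 s2
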